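-- pv_equiv track=rewrite | github.com/ihfazhillah/pillow-tutorial-3 | main.py | transform_value
-- ===== SOURCE A (Python) =====
-- def transform_value(original, destination):
--     # dapatkan index tiap kata dari destination
--     word_and_index = []
--     for index, text in enumerate(destination):
--         for word in text.split(" "):
--             word_and_index.append((word, index))
--
--     # siapkan final destination, list of the pair of text and list
--     final_destination = [(text, []) for text in destination]
--
--     # map original data ke final destination
--     for (word, value), (word_dest, index) in zip(original, word_and_index):
--
--         # index 0 adalah text, 1 adalah list value
--         final_destination[index][1].append(value)
--
--     return final_destination
-- ===== SOURCE B (Python) =====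
-- def transform_value(original, destination):
--     # chunk slicing: compute per-text word counts, take the needed prefix of the
--     # value column, and hand each text its consecutive slice of it
--     counts = [len(text.split(" ")) for text in destination]
--     values = [pair[1] for pair in original[:sum(counts)]]
--     result = []
--     start = 0
--     for text, count in zip(destination, counts):
--         result.append((text, values[start:start + count]))
--         start += count
--     return result
-- ===== Notes on version B (the rewrite author's own statement) =====
-- stated objective: alternative
-- what changed: B never walks individual words into buckets: it computes per-text word counts, takes the matching prefix of original's value column, and builds each bucket as one contiguous slice of that column, instead of A's flatten-words-then-zip pass that appends values one by one through an index table.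
import Mathlib
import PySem

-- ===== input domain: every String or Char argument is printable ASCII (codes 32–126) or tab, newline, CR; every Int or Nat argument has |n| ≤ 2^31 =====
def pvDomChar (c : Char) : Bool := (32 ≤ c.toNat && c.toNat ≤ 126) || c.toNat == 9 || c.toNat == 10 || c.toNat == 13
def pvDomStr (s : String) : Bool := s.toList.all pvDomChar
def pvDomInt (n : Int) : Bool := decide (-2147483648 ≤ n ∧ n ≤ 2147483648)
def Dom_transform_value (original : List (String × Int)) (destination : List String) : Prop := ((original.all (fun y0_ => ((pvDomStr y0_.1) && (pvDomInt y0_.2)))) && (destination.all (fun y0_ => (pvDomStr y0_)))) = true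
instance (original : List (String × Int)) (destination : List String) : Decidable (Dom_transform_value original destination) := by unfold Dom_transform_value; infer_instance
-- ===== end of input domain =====

-- B replaces A's flatten-words-then-zip append pass by chunk slicing: per-text
-- word counts, one prefix of the value column, one contiguous slice per bucket;
-- return values are equal on all inputs (neither version mutates its arguments).

-- A's `final_destination[index][1].append(v)` (index from enumerate, hence a
-- nonnegative Int; exact for every in-range nonnegative index)
def appendAt (fd : List (String × List Int)) (i : Int) (v : Int) : List (String × List Int) :=
  match fd with
  | [] => []
  | x :: xs => if i = 0 then (x.1, x.2 ++ [v]) :: xs else x :: appendAt xs (i - 1) v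

-- ===== PORT A =====
def transform_value (original : List (String × Int)) (destination : List String) : List (String × List Int) :=
  -- text.split(" "): sep is the nonempty literal " ", so split? is always some (getD exact)
  -- word_and_index: for index, text in enumerate(destination): for word in text.split(" "): append (word, index)
  let word_and_index : List (String × Int) :=
    (PySem.List.enumerate destination).foldl
      (fun acc p => acc ++ (((PySem.Str.split? p.2 " ").getD [])).map (fun w => (w, p.1))) []
  -- final_destination = [(text, []) for text in destination]
  let final_destination : List (String × List Int) := destination.map (fun t => (t, []))
  -- for (word, value), (word_dest, index) in zip(original, word_and_index): final_destination[index][1].append(value)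
  (original.zip word_and_index).foldl (fun fd q => appendAt fd q.2.2 q.1.2) final_destination

-- ===== PORT B =====
def transform_value_alt (original : List (String × Int)) (destination : List String) : List (String × List Int) :=
  -- counts = [len(text.split(" ")) for text in destination]
  let counts : List Int := destination.map (fun t => (((PySem.Str.split? t " ").getD []).length : Int))
  -- values = [pair[1] for pair in original[:sum(counts)]]
  let values : List Int := (PySem.List.slice original none (some counts.sum)).map (fun p => p.2)
  -- result/start loop over zip(destination, counts)
  ((destination.zip counts).foldl
    (fun st p => (st.1 ++ [(p.1, PySem.List.slice values (some st.2) (some (st.2 + p.2)))], st.2 + p.2))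
    (([] : List (String × List Int)), (0 : Int))).1

-- ===== PRECONDITION & SPEC =====
def Spec_transform_value (original : List (String × Int)) (destination : List String) (out : List (String × List Int)) : Prop := out = transform_value_alt original destination
instance (original : List (String × Int)) (destination : List String) (out : List (String × List Int)) : Decidable (Spec_transform_value original destination out) := by unfold Spec_transform_value; infer_instance

-- ===== CLAIM (what is proved, stated in full; the proofs are below) =====
def Claim_equal_transform_value : Prop := ∀ (original : List (String × Int)) (destination : List String), Dom_transform_value original destination → Spec_transform_value original destination (transform_value original destination)

-- ===== LEMMAS AND PROOFS =====

-- the words of a text, and the common recursive description of the result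
def pvWords (t : String) : List String := (PySem.Str.split? t " ").getD []

def pvSpec (original : List (String × Int)) (destination : List String) : List (String × List Int) :=
  match destination with
  | [] => []
  | d :: ds =>
      (d, (original.take (pvWords d).length).map (fun p => p.2)) ::
        pvSpec (original.drop (pvWords d).length) ds

-- ---- A-side ----

def astep (fd : List (String × List Int)) (q : (String × Int) × (String × Int)) : List (String × List Int) :=
  appendAt fd q.2.2 q.1.2

-- flattened word table of A, started at index s
def pvWl (destination : List String) (s : Int) : List (String × Int) :=
  (PySem.List.enumerate destination s).flatMap (fun p => (pvWords p.2).map (fun w => (w, p.1)))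

theorem enumerate_shift {α : Type} (xs : List α) (s : Int) :
    PySem.List.enumerate xs (s + 1) = (PySem.List.enumerate xs s).map (fun p => (p.1 + 1, p.2)) := by
  induction xs generalizing s with
  | nil => simp [PySem.List.enumerate_nil]
  | cons x xs ih =>
    simp only [PySem.List.enumerate_cons, List.map_cons]
    rw [show s + 1 + 1 = (s + 1) + 1 by ring, ih (s + 1)]

theorem zip_append_split {α β : Type} (orig : List α) (l1 l2 : List β) :
    orig.zip (l1 ++ l2) = orig.zip l1 ++ (orig.drop l1.length).zip l2 := by
  induction l1 generalizing orig with
  | nil => simp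
  | cons b l1 ih =>
    cases orig with
    | nil => simp
    | cons a orig => simp [ih]

-- one chunk: all indices 0, the head bucket absorbs the values
theorem fold_chunk (orig : List (String × Int)) (ws : List String) (d : String)
    (acc : List Int) (rest : List (String × List Int)) :
    (orig.zip (ws.map (fun w => (w, (0 : Int))))).foldl astep ((d, acc) :: rest)
      = (d, acc ++ (orig.take ws.length).map (fun p => p.2)) :: rest := by
  induction ws generalizing orig acc with
  | nil => simp
  | cons w ws ih =>
    cases orig with
    | nil => simp
    | cons o orig => simp [astep, appendAt, ih]

-- every index recorded by pvWl is at least its start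
theorem enumerate_fst_le {α : Type} (xs : List α) (s : Int) :
    ∀ p ∈ PySem.List.enumerate xs s, s ≤ p.1 := by
  induction xs generalizing s with
  | nil => simp [PySem.List.enumerate_nil]
  | cons x xs ih =>
    intro p hp
    rw [PySem.List.enumerate_cons] at hp
    rcases List.mem_cons.mp hp with h | h
    · simp [h]
    · have := ih (s + 1) p h; omega

theorem pvWl_fst_le (ds : List String) (s : Int) : ∀ q ∈ pvWl ds s, s ≤ q.2 := by
  intro q hq
  simp only [pvWl, List.mem_flatMap, List.mem_map] at hq
  obtain ⟨p, hp, w, _, rfl⟩ := hq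
  exact enumerate_fst_le ds s p hp

-- shifted tail: the head bucket is never touched
theorem fold_shift (orig : List (String × Int)) (tail : List (String × Int))
    (hnn : ∀ q ∈ tail, 0 ≤ q.2)
    (x : String × List Int) (fd : List (String × List Int)) :
    (orig.zip (tail.map (fun q => (q.1, q.2 + 1)))).foldl astep (x :: fd)
      = x :: (orig.zip tail).foldl astep fd := by
  induction tail generalizing orig x fd with
  | nil => simp
  | cons q tail ih =>
    cases orig with
    | nil => simp
    | cons o orig =>
      simp only [List.map_cons, List.zip_cons_cons, List.foldl_cons]
      have hq : (0:Int) ≤ q.2 := hnn q (by simp)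
      have : astep (x :: fd) (o, (q.1, q.2 + 1)) = x :: astep fd (o, q) := by
        simp only [astep, appendAt]
        rw [if_neg (by omega)]
        simp
      rw [this, ih orig (fun r hr => hnn r (List.mem_cons_of_mem _ hr))]

theorem a_eq_spec (orig : List (String × Int)) (destination : List String) :
    (orig.zip (pvWl destination 0)).foldl astep (destination.map (fun t => (t, ([] : List Int))))
      = pvSpec orig destination := by
  induction destination generalizing orig with
  | nil => simp [pvWl, PySem.List.enumerate_nil, pvSpec]
  | cons d ds ih =>
    have hwl : pvWl (d :: ds) 0
        = (pvWords d).map (fun w => (w, (0 : Int))) ++ (pvWl ds 0).map (fun q => (q.1, q.2 + 1)) := by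
      have h1 : (0 : Int) + 1 = 1 := by ring
      simp [pvWl, PySem.List.enumerate_cons]
      rw [show (1 : Int) = 0 + 1 by ring, enumerate_shift]
      simp [List.flatMap_map, List.map_flatMap, List.map_map, Function.comp_def]
    rw [hwl, zip_append_split, List.foldl_append]
    simp only [List.length_map, List.map_cons]
    rw [fold_chunk, fold_shift _ _ (pvWl_fst_le ds 0), ih]
    simp [pvSpec]

-- ---- B-side ----

-- the same distribution expressed on the value column alone
def pvSpecV (vals : List Int) (destination : List String) : List (String × List Int) :=
  match destination with
  | [] => []
  | d :: ds => (d, vals.take (pvWords d).length) :: pvSpecV (vals.drop (pvWords d).length) ds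

def wcount (destination : List String) : List Nat := destination.map (fun t => (pvWords t).length)

theorem pvSpec_eq_specV (orig : List (String × Int)) (destination : List String) :
    pvSpec orig destination = pvSpecV (orig.map (fun p => p.2)) destination := by
  induction destination generalizing orig with
  | nil => rfl
  | cons d ds ih => simp [pvSpec, pvSpecV, ih, List.map_take, List.map_drop]

theorem counts_sum_cast (destination : List String) :
    (destination.map (fun t => ((pvWords t).length : Int))).sum = ((wcount destination).sum : Int) := by
  induction destination with
  | nil => simp [wcount]
  | cons d ds ih =>
    simp only [wcount, List.map_cons, List.sum_cons]
    simp only [wcount] at ih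
    rw [ih]; push_cast; ring

theorem pvSpecV_take (vals : List Int) (destination : List String) :
    pvSpecV (vals.take (wcount destination).sum) destination = pvSpecV vals destination := by
  induction destination generalizing vals with
  | nil => rfl
  | cons d ds ih =>
    simp only [pvSpecV, wcount, List.map_cons, List.sum_cons]
    rw [List.take_take, Nat.min_eq_left (Nat.le_add_right _ _), List.drop_take,
      Nat.add_sub_cancel_left]
    have h := ih (vals.drop (pvWords d).length)
    simp only [wcount] at h
    rw [h]

theorem b_fold (destination : List String) (vals : List Int)
    (acc : List (String × List Int)) (s : Nat) :
    ((destination.zip (destination.map (fun t => ((pvWords t).length : Int)))).foldl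
      (fun st p => (st.1 ++ [(p.1, PySem.List.slice vals (some st.2) (some (st.2 + p.2)))], st.2 + p.2))
      (acc, (s : Int))).1
    = acc ++ pvSpecV (vals.drop s) destination := by
  induction destination generalizing acc s with
  | nil => simp [pvSpecV]
  | cons d ds ih =>
    simp only [List.map_cons, List.zip_cons_cons, List.foldl_cons]
    rw [show ((s : Int) + ((pvWords d).length : Int)) = ((s + (pvWords d).length : Nat) : Int) by push_cast; ring]
    rw [ih]
    rw [PySem.List.slice_natCast, Nat.add_sub_cancel_left]
    simp [pvSpecV, List.drop_drop]

-- ===== VERDICT (by name: the statement is the Claim_ definition above) =====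
theorem transform_value_spec : Claim_equal_transform_value := by
  intro original destination _
  unfold Spec_transform_value transform_value transform_value_alt
  rw [PySem.List.foldl_append_eq_flatMap]
  simp only [List.nil_append]
  have hA := a_eq_spec original destination
  rw [show astep = fun fd (q : (String × Int) × (String × Int)) => appendAt fd q.2.2 q.1.2 from rfl] at hA
  simp only [pvWl, pvWords] at hA
  rw [hA, pvSpec_eq_specV]
  have hB := b_fold destination
    (((PySem.List.slice original none (some ((destination.map (fun t => (((PySem.Str.split? t " ").getD []).length : Int))).sum))).map (fun p => p.2)))
    [] 0
  simp only [pvWords, Nat.cast_zero, List.drop_zero, List.nil_append] at hB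
  rw [hB]
  have hsum := counts_sum_cast destination
  simp only [pvWords] at hsum
  rw [hsum, PySem.List.slice_to_natCast, List.map_take]
  exact (pvSpecV_take (original.map (fun p => p.2)) destination).symm
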